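-- pv_equiv track=rewrite | github.com/ldecampos/OpenRig | src/openrig/naming/utils.py | decrement_character
-- ===== SOURCE A (Python) =====
-- def decrement_character(text: str) -> str:
--     """Decrements a letter sequence in a manner similar to Excel column naming.
--
--     - Works for both uppercase and lowercase sequences
--     - Handles cases like 'AAA' → 'ZZ' and 'aaa' → 'zz'
--
--     Args:
--         text: A text containing only letters ('A'-'Z' or 'a'-'z').
--
--     Returns:
--         The decremented letter sequence.
--     """
--     chars = list(text)
--     is_upper = chars[0].isupper()
--     start_char = "A" if is_upper else "a"
--     end_char = "Z" if is_upper else "z"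
--     i = len(chars) - 1
--     while i >= 0:
--         if chars[i] != start_char:
--             chars[i] = chr(ord(chars[i]) - 1)
--             return "".join(chars)
--         else:
--             chars[i] = end_char
--             i -= 1
--     return "".join(chars[1:])
-- ===== SOURCE B (Python) =====
-- def decrement_character(text: str) -> str:
--     """Boundary-find-then-rebuild: rstrip the trailing run of start chars,
--     decrement the boundary char, pad with end chars. No per-char loop."""
--     start_char, end_char = ("A", "Z") if text[0].isupper() else ("a", "z")
--     stripped = text.rstrip(start_char)
--     if not stripped:
--         return end_char * (len(text) - 1)
--     return stripped[:-1] + chr(ord(stripped[-1]) - 1) + end_char * (len(text) - len(stripped))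
-- ===== Notes on version B (the rewrite author's own statement) =====
-- stated objective: simpler
-- what changed: Replaces the mutate-array backward borrow loop with a boundary computation: rstrip the trailing run of start characters, decrement the character at the boundary, and append the matching number of end characters.
import Mathlib
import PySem

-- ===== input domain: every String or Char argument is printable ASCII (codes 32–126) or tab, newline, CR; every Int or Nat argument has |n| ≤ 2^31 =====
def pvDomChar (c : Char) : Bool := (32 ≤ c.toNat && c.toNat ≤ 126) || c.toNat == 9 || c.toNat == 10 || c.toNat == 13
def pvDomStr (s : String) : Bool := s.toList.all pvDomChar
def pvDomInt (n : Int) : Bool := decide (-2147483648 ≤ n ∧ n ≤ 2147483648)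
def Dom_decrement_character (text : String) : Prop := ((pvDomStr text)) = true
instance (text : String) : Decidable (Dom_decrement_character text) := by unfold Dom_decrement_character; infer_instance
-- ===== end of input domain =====

-- B replaces A's backward borrow loop by rstrip-the-trailing-run + decrement boundary + pad; simpler decomposition, same O(n) cost.


-- ===== PORT A =====
-- A's while loop runs i from len-1 downwards, mutating chars[i]; ported as structural
-- recursion over the REVERSED char list carrying the same mutated suffix: the Bool is
-- 'the loop returned inside the body' (true) vs 'i fell below 0' (false).
def pvALoop (sc ec : Char) : List Char → Bool × List Char
  | [] => (false, [])
  | c :: rest =>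
    if c ≠ sc then (true, Char.ofNat (c.toNat - 1) :: rest)
    else
      let r := pvALoop sc ec rest
      (r.1, ec :: r.2)

def decrement_character (text : String) : String :=
  match text.toList with
  | [] => ""   -- Python raises IndexError here (chars[0]); excluded by Pre_
  | c0 :: _ =>
    let isUpper := PySem.Chars.isupper c0
    let sc := if isUpper then 'A' else 'a'
    let ec := if isUpper then 'Z' else 'z'
    let r := pvALoop sc ec text.toList.reverse
    if r.1 then String.mk r.2.reverse      -- "".join(chars) after the in-loop return
    else String.mk r.2.reverse.tail        -- "".join(chars[1:]) after the loop ends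

-- ===== PORT B =====
-- text.rstrip(start_char): PySem has no rstrip-with-chars, ported by hand as
-- reverse / dropWhile (== sc) / reverse — exact for a single-character strip set.
def decrement_character_alt (text : String) : String :=
  match text.toList with
  | [] => ""   -- Python raises IndexError here (text[0]); excluded by Pre_
  | c0 :: _ =>
    let cs := text.toList
    let (sc, ec) := if PySem.Chars.isupper c0 then ('A', 'Z') else ('a', 'z')
    let stripped := (cs.reverse.dropWhile (· == sc)).reverse
    if stripped.isEmpty then
      String.mk (List.replicate (cs.length - 1) ec)
    else
      String.mk (stripped.dropLast ++
        Char.ofNat (stripped.getLast!.toNat - 1) :: List.replicate (cs.length - stripped.length) ec)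

-- ===== PRECONDITION & SPEC =====
-- Pre_ excludes only the empty string, on which A raises IndexError (chars[0]).
def Pre_decrement_character (text : String) : Prop := text ≠ ""
instance (text : String) : Decidable (Pre_decrement_character text) := by unfold Pre_decrement_character; infer_instance
def pvWitness_decrement_character : String := "AzA"

def Spec_decrement_character (text : String) (out : String) : Prop := out = decrement_character_alt text
instance (text : String) (out : String) : Decidable (Spec_decrement_character text out) := by unfold Spec_decrement_character; infer_instance

-- ===== CLAIM (what is proved, stated in full; the proofs are below) =====
def Claim_equal_decrement_character : Prop := ∀ (text : String), Dom_decrement_character text → Pre_decrement_character text → Spec_decrement_character text (decrement_character text)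

-- ===== LEMMAS AND PROOFS =====

-- A's loop, characterised by the dropWhile boundary of its (reversed) input.
lemma pvALoop_eq (sc ec : Char) (rs : List Char) :
    pvALoop sc ec rs =
      match rs.dropWhile (· == sc) with
      | [] => (false, List.replicate rs.length ec)
      | c :: tl => (true, List.replicate (rs.length - (tl.length + 1)) ec
                          ++ Char.ofNat (c.toNat - 1) :: tl) := by
  induction rs with
  | nil => simp [pvALoop]
  | cons c rest ih =>
    by_cases h : c = sc
    · subst h
      have hlen : (rest.dropWhile (· == c)).length ≤ rest.length :=
        List.length_dropWhile_le _ _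
      simp only [pvALoop, List.dropWhile_cons, BEq.rfl, if_true, ite_not, if_pos rfl, ih]
      cases hd : rest.dropWhile (· == c) with
      | nil => simp [List.replicate_succ]
      | cons x tl =>
        have : rest.length + 1 - (tl.length + 1) = (rest.length - (tl.length + 1)) + 1 := by
          rw [hd] at hlen; simp at hlen; omega
        simp [hd, this, List.replicate_succ]
    · simp [pvALoop, h, List.dropWhile_cons, List.replicate]

lemma getLast!_concat (xs : List Char) (c : Char) : (xs ++ [c]).getLast! = c := by
  induction xs with
  | nil => rfl
  | cons x xs ih => cases xs <;> simpa [List.getLast!] using ih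

-- ===== VERDICT =====
theorem decrement_character_spec : Claim_equal_decrement_character := by
  intro text _ hpre
  show decrement_character text = decrement_character_alt text
  have htl : text.toList ≠ [] := by
    intro h
    exact hpre (by simpa using congrArg String.ofList h)
  cases h : text.toList with
  | nil => exact absurd h htl
  | cons c0 rest =>
    simp only [decrement_character, decrement_character_alt, h]
    set sc := if PySem.Chars.isupper c0 then 'A' else 'a' with hsc
    set ec := if PySem.Chars.isupper c0 then 'Z' else 'z' with hec
    have hpair : (if PySem.Chars.isupper c0 then ('A', 'Z') else ('a', 'z')) = (sc, ec) := by
      by_cases hu : PySem.Chars.isupper c0 <;> simp [hsc, hec, hu]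
    rw [pvALoop_eq, hpair]
    cases hd : (c0 :: rest).reverse.dropWhile (· == sc) with
    | nil =>
      simp [hd, List.reverse_replicate, List.tail_replicate]
    | cons c tl =>
      have hne : ¬ (tl.reverse ++ [c]).isEmpty := by simp
      have hlen := List.length_dropWhile_le (· == sc) (c0 :: rest).reverse
      rw [hd] at hlen
      simp only [List.length_reverse, List.length_cons] at hlen
      simp only [List.reverse_cons, List.reverse_append, List.reverse_replicate,
        List.reverse_reverse, List.length_reverse, List.length_cons, hne,
        Bool.false_eq_true, if_false]
      rw [List.dropLast_concat, getLast!_concat]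
      simp only [List.length_append, List.length_reverse, List.length_cons,
        List.length_replicate, List.cons_append, List.nil_append]
      simp
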